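-- pv_equiv track=rewrite | github.com/nhnquang11/cs106a-fa20 | Section5/string_parsing.py | exclaim
-- ===== SOURCE A (Python) =====
-- def exclaim(s):
-- 	"""
-- 	Given a string s, look for the first exclamation mark.
-- 	If there is a substring of 1 or more alphabetic characters
-- 	immediately to the left of the exclamation mark,
-- 	return this substring including the exclamation mark.
-- 	Otherwise, return the empty string.
-- 	>>> exclaim('xx Hello! yy')
-- 	'Hello!'
-- 	>>> exclaim('!Hello')
-- 	''
-- 	"""
-- 	mark = s.find('!')
-- 	if mark == -1:
-- 		return False
--
-- 	result = '!'
-- 	for i in reversed(range(mark)):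
-- 		if not s[i].isalpha():
-- 			break
-- 		result = s[i] + result
--
-- 	if len(result) > 1:
-- 		return result
-- 	return ''
-- ===== SOURCE B (Python) =====
-- def exclaim(s):
--     mark = s.find('!')
--     if mark == -1:
--         return ''
--     prefix = s[:mark]
--     start = 0
--     for i, ch in enumerate(prefix):
--         if not ch.isalpha():
--             start = i + 1
--     result = prefix[start:] + '!'
--     return result if len(result) > 1 else ''
-- ===== Notes on version B (the rewrite author's own statement) =====
-- stated objective: alternative
-- what changed: Replaces A's reverse scan from the mark with accumulation-and-break by a single forward pass over the prefix that maintains the start boundary (start = last non-alpha index + 1) and takes a final slice. Pre_ excludes strings without '!', on which A returns False instead of a string.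
-- outside the precondition, e.g. on exclaim('abc'): A returns False, B returns ''
import Mathlib
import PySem

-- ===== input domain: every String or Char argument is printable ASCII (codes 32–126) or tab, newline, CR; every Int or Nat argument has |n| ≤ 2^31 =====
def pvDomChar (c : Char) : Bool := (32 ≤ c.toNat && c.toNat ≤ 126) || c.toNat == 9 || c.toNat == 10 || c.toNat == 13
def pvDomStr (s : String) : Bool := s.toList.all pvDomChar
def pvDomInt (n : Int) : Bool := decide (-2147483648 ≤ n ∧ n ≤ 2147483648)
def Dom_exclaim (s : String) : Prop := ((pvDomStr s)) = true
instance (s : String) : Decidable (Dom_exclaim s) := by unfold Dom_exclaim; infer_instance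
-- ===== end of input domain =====

-- B replaces A's reverse accumulate-until-non-alpha loop by a forward pass over the prefix maintaining a start boundary, then one slice (alternative decomposition, same cost).

-- ===== PORT A =====
-- A's loop 'for i in reversed(range(mark)): if not s[i].isalpha(): break; result = s[i] + result'
-- iterates the characters of s[:mark] from the right: recursion over the reversed prefix.
def exclaimLoopA : List Char → List Char → List Char
  | [], result => result
  | c :: rest, result =>
      if PySem.Chars.isalpha c then exclaimLoopA rest (c :: result)  -- result = s[i] + result
      else result                                                    -- break

def exclaim (s : String) : String :=
  let mark := PySem.Str.find s "!"
  if mark = -1 then "" else                        -- A returns False here (not a string): outside Pre_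
  let result := exclaimLoopA ((PySem.Str.slice s none (some mark)).toList.reverse) ['!']
  if result.length > 1 then String.ofList result else ""

-- ===== PORT B =====
def exclaim_alt (s : String) : String :=
  let mark := PySem.Str.find s "!"
  if mark = -1 then "" else
  let pre := (PySem.Str.slice s none (some mark)).toList
  let start : Int := (PySem.List.enumerate pre 0).foldl
      (fun st p => if PySem.Chars.isalpha p.2 then st else p.1 + 1) 0
  let result := PySem.List.slice pre (some start) none ++ ['!']
  if result.length > 1 then String.ofList result else ""

-- ===== PRECONDITION & SPEC =====
-- Pre_ excludes strings with no '!', on which A returns False — not a value of the declared string type.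
def Pre_exclaim (s : String) : Prop := '!' ∈ s.toList
instance (s : String) : Decidable (Pre_exclaim s) := by unfold Pre_exclaim; infer_instance
def pvWitness_exclaim : String := "xx Hello! yy"
def Spec_exclaim (s : String) (out : String) : Prop := out = exclaim_alt s
instance (s : String) (out : String) : Decidable (Spec_exclaim s out) := by unfold Spec_exclaim; infer_instance

-- ===== CLAIM (what is proved, stated in full; the proofs are below) =====
def Claim_equal_exclaim : Prop := ∀ (s : String), Dom_exclaim s → Pre_exclaim s → Spec_exclaim s (exclaim s)

-- ===== LEMMAS AND PROOFS =====

-- B's start accumulator over the forward enumeration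
def startF (cs : List Char) : Int :=
  (PySem.List.enumerate cs 0).foldl (fun st p => if PySem.Chars.isalpha p.2 then st else p.1 + 1) 0

lemma enumerate_append_singleton (xs : List Char) (x : Char) (s : Int) :
    PySem.List.enumerate (xs ++ [x]) s
      = PySem.List.enumerate xs s ++ [((s + xs.length : Int), x)] := by
  induction xs generalizing s with
  | nil => simp [PySem.List.enumerate_nil, PySem.List.enumerate_cons]
  | cons y ys ih =>
      simp [PySem.List.enumerate_cons, ih]
      ring_nf

lemma startF_snoc (xs : List Char) (x : Char) :
    startF (xs ++ [x])
      = if PySem.Chars.isalpha x then startF xs else (xs.length : Int) + 1 := by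
  simp [startF, enumerate_append_singleton, List.foldl_append]

lemma startF_bounds_and_loop (cs : List Char) :
    (0 ≤ startF cs ∧ startF cs ≤ cs.length) ∧
    ∀ acc, exclaimLoopA cs.reverse acc = cs.drop (startF cs).toNat ++ acc := by
  induction cs using List.reverseRecOn with
  | nil => simp [startF, PySem.List.enumerate_nil, exclaimLoopA]
  | append_singleton xs x ih =>
      rcases ih with ⟨⟨h0, hl⟩, hloop⟩
      rw [startF_snoc]
      by_cases hx : PySem.Chars.isalpha x
      · rw [if_pos hx]
        refine ⟨⟨h0, by calc startF xs ≤ (xs.length : Int) := hl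
                          _ ≤ ((xs ++ [x]).length : Int) := by simp⟩, ?_⟩
        intro acc
        rw [List.reverse_append]
        simp only [List.reverse_singleton, List.singleton_append, exclaimLoopA, if_pos hx]
        rw [hloop (x :: acc),
          List.drop_append_of_le_length (by omega : (startF xs).toNat ≤ xs.length)]
        simp
  -- non-alphabetic last char: A breaks immediately, B's start jumps past the end
      · rw [if_neg hx]
        refine ⟨⟨by omega, by simp⟩, ?_⟩
        intro acc
        rw [List.reverse_append]
        simp only [List.reverse_singleton, List.singleton_append, exclaimLoopA, if_neg hx]
        have h1 : ((xs.length : Int) + 1).toNat = xs.length + 1 := by omega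
        rw [h1, List.drop_eq_nil_of_le (by simp)]
        simp

-- ===== VERDICT (by name: the statement is the Claim_ definition above) =====
theorem exclaim_spec : Claim_equal_exclaim := by
  intro s _ hpre
  unfold Spec_exclaim exclaim exclaim_alt
  have hfind : PySem.Str.find s "!" ≠ -1 := by
    rw [PySem.Str.find_ne_neg_one_iff]
    exact (List.singleton_infix_iff '!' s.toList).mpr hpre
  simp only [if_neg hfind]
  obtain ⟨⟨h0, _⟩, hloop⟩ :=
    startF_bounds_and_loop (PySem.Str.slice s none (some (PySem.Str.find s "!"))).toList
  rw [hloop ['!']]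
  simp only [startF] at h0 ⊢
  rw [PySem.List.slice_from _ h0]
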